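-- pv_equiv track=rewrite | github.com/elonmj/Code-traffic-flow | code/validation/kaggle_manager_validation.py | _analyze_validation_success
-- ===== SOURCE A (Python) =====
-- from typing import Dict, List, Optional, Any
--
-- def _analyze_validation_success(results: Dict[str, Any]) -> bool:
--     """Analyze overall validation success based on phases."""
--     phases = results.get('phases', {})
--
--     # Check critical phases
--     critical_phases = ['infrastructure', 'analytical', 'performance']
--     critical_successes = sum(
--         1 for phase in critical_phases
--         if phases.get(phase, {}).get('success', False)
--     )
--
--     # At least 2/3 critical phases must succeed for overall success
--     return critical_successes >= 2
-- ===== SOURCE B (Python) =====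
-- def _analyze_validation_success(results):
--     """Analyze overall validation success based on phases."""
--     phases = results.get('phases', {})
--     a = phases.get('infrastructure', {}).get('success', False)
--     b = phases.get('analytical', {}).get('success', False)
--     c = phases.get('performance', {}).get('success', False)
--     # majority of the three critical phases
--     return bool((a and b) or (a and c) or (b and c))
-- ===== Notes on version B (the rewrite author's own statement) =====
-- stated objective: simpler
-- what changed: Replaces the generator-sum counter compared against 2 with three named phase booleans combined by a closed-form majority formula (a and b) or (a and c) or (b and c).
import Mathlib
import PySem

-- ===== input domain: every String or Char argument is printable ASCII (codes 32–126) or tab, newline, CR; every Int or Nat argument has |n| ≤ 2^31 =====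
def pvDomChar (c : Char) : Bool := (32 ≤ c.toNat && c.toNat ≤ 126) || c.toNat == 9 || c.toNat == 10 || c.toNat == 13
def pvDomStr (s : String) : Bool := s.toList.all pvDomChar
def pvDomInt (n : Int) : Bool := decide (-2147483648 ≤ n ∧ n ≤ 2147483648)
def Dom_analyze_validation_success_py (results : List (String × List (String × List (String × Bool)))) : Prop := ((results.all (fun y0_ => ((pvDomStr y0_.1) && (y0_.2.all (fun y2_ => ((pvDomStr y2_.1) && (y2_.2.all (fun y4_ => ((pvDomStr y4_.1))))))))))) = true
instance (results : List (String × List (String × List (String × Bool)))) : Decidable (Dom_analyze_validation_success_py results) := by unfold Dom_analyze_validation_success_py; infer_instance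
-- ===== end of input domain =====

-- B replaces A's generator-sum-of-successes-compared-to-2 with a closed-form three-way majority of named phase booleans (simpler).


-- shared accessor: Python dict.get(k, dflt) on an association list (first match)
def pvGetD {α : Type} (d : List (String × α)) (k : String) (dflt : α) : α :=
  match d with
  | [] => dflt
  | (k', v) :: rest => if k' == k then v else pvGetD rest k dflt

-- ===== PORT A =====
def analyze_validation_success_py (results : List (String × List (String × List (String × Bool)))) : Bool :=
  let phases := pvGetD results "phases" []
  let critical_phases := ["infrastructure", "analytical", "performance"]
  let critical_successes : Int := critical_phases.foldl
    (fun acc phase => if pvGetD (pvGetD phases phase []) "success" false then acc + 1 else acc) 0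
  decide (critical_successes ≥ 2)

-- ===== PORT B =====
def analyze_validation_success_py_alt (results : List (String × List (String × List (String × Bool)))) : Bool :=
  let phases := pvGetD results "phases" []
  let a := pvGetD (pvGetD phases "infrastructure" []) "success" false
  let b := pvGetD (pvGetD phases "analytical" []) "success" false
  let c := pvGetD (pvGetD phases "performance" []) "success" false
  (a && b) || (a && c) || (b && c)

-- ===== PRECONDITION & SPEC =====
def Spec_analyze_validation_success_py (results : List (String × List (String × List (String × Bool)))) (out : Bool) : Prop := out = analyze_validation_success_py_alt results
instance (results : List (String × List (String × List (String × Bool)))) (out : Bool) : Decidable (Spec_analyze_validation_success_py results out) := by unfold Spec_analyze_validation_success_py; infer_instance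

-- ===== CLAIM =====
def Claim_equal_analyze_validation_success_py : Prop := ∀ (results : List (String × List (String × List (String × Bool)))), Dom_analyze_validation_success_py results → Spec_analyze_validation_success_py results (analyze_validation_success_py results)

-- ===== LEMMAS AND PROOFS =====

-- ===== VERDICT =====
theorem analyze_validation_success_py_spec : Claim_equal_analyze_validation_success_py := by
  intro results _
  unfold Spec_analyze_validation_success_py analyze_validation_success_py analyze_validation_success_py_alt
  simp only [List.foldl]
  generalize pvGetD (pvGetD (pvGetD results "phases" []) "infrastructure" []) "success" false = a
  generalize pvGetD (pvGetD (pvGetD results "phases" []) "analytical" []) "success" false = b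
  generalize pvGetD (pvGetD (pvGetD results "phases" []) "performance" []) "success" false = c
  cases a <;> cases b <;> cases c <;> decide
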